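-- pv_equiv track=rewrite | github.com/hellincarolina/PythonExamples | intersperse_list.py | get_first_invalid_position
-- ===== SOURCE A (Python) =====
-- def get_first_invalid_position(coin_flips, starting_with, value_to_find):
--     """
--     In a list of expected interspersed values, this function finds the index of the first invalid position
--     e.g. Given this list: [0, 1, 1, 0] get the first invalid 1. The expected result is 2
--     :param coin_flips: list of values to be evaluated
--     :param starting_with: expected starting value in the list
--     :param value_to_find: value to be evaluated
--     :return: index of the first invalid ocurrence of the value_to_find
--     """
--     index = 0
--     last_index = 0
--     if coin_flips.count(value_to_find) == 0:
--         return None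
--     expected_value = starting_with
--     for value in coin_flips:
--         if value != expected_value and value == value_to_find:
--             return index
--         else:
--             if value == value_to_find:
--                 last_index = index
--             expected_value = int(not expected_value)
--             index = index + 1
--     return last_index
-- ===== SOURCE B (Python) =====
-- def get_first_invalid_position(coin_flips, starting_with, value_to_find):
--     positions = [i for i, v in enumerate(coin_flips) if v == value_to_find]
--     if not positions:
--         return None
--     base = 0 if starting_with else 1  # expected value at index 1
--     for i in positions:
--         expected = starting_with if i == 0 else (base if i % 2 == 1 else 1 - base)
--         if value_to_find != expected:
--             return i
--     return positions[-1]
-- ===== Notes on version B (the rewrite author's own statement) =====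
-- stated objective: alternative
-- what changed: B first builds the list of occurrence indices of value_to_find, then checks each against a closed-form expected value computed from the index's parity (instead of A's single scan that toggles an expected-value accumulator and tracks last_index), returning positions[-1] as the fallback.
import Mathlib
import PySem

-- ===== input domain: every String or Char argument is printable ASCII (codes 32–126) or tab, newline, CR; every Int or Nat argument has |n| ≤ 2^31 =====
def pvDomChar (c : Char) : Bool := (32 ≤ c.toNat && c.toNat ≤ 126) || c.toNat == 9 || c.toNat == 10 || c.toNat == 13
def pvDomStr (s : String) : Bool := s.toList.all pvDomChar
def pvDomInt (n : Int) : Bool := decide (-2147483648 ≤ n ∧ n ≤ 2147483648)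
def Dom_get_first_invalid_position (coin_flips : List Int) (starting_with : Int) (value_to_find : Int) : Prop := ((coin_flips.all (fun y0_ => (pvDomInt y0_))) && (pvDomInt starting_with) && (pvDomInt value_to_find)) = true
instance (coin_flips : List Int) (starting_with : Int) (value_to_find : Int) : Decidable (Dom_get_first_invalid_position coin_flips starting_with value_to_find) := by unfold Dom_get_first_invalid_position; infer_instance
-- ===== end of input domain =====

-- B replaces A's toggling scan by an occurrence-index list checked against a parity closed form (alternative decomposition, same O(n) cost).

-- ===== PORT A =====
-- the loop of A: state = (index, last_index, expected_value)
def pvLoopA (vtf : Int) : List Int → Int → Int → Int → Option Int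
  | [], _, last_index, _ => some last_index
  | v :: rest, index, last_index, expected =>
    if v ≠ expected ∧ v = vtf then some index
    else pvLoopA vtf rest (index + 1)
        (if v = vtf then index else last_index)
        (if expected = 0 then 1 else 0)   -- int(not expected_value)

def get_first_invalid_position (coin_flips : List Int) (starting_with : Int) (value_to_find : Int) : Option Int :=
  if PySem.List.count coin_flips value_to_find = 0 then none
  else pvLoopA value_to_find coin_flips 0 0 starting_with

-- ===== PORT B =====
-- expected pattern value at occurrence index i (i == 0 uses the raw starting_with)
def pvExpected (starting_with base i : Int) : Int :=
  if i = 0 then starting_with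
  else if PySem.Int.mod i 2 = 1 then base else 1 - base

-- the for-loop of B over the occurrence positions
def pvLoopB (starting_with base vtf : Int) : List Int → Option Int
  | [] => none
  | i :: rest =>
    if vtf ≠ pvExpected starting_with base i then some i
    else pvLoopB starting_with base vtf rest

def get_first_invalid_position_alt (coin_flips : List Int) (starting_with : Int) (value_to_find : Int) : Option Int :=
  let positions := ((PySem.List.enumerate coin_flips).filter (fun p => p.2 = value_to_find)).map Prod.fst
  if positions = [] then none
  else
    let base : Int := if starting_with ≠ 0 then 0 else 1
    match pvLoopB starting_with base value_to_find positions with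
    | some i => some i
    | none => PySem.List.pyGet? positions (-1)

-- ===== PRECONDITION & SPEC =====
def Spec_get_first_invalid_position (coin_flips : List Int) (starting_with : Int) (value_to_find : Int) (out : Option Int) : Prop := out = get_first_invalid_position_alt coin_flips starting_with value_to_find
instance (coin_flips : List Int) (starting_with : Int) (value_to_find : Int) (out : Option Int) : Decidable (Spec_get_first_invalid_position coin_flips starting_with value_to_find out) := by unfold Spec_get_first_invalid_position; infer_instance

-- ===== CLAIM (what is proved, stated in full; the proofs are below) =====
def Claim_equal_get_first_invalid_position : Prop := ∀ (coin_flips : List Int) (starting_with : Int) (value_to_find : Int), Dom_get_first_invalid_position coin_flips starting_with value_to_find → Spec_get_first_invalid_position coin_flips starting_with value_to_find (get_first_invalid_position coin_flips starting_with value_to_find)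

-- ===== LEMMAS AND PROOFS =====

-- occurrence positions of vtf in cf, with enumeration starting at k
def pvPosFrom (vtf k : Int) (cf : List Int) : List Int :=
  ((PySem.List.enumerate cf k).filter (fun p => p.2 = vtf)).map Prod.fst

-- combined result of B's loop plus its fallback, with default l
def pvSpecB (sw base vtf l : Int) (ps : List Int) : Option Int :=
  match pvLoopB sw base vtf ps with
  | some i => some i
  | none => some (ps.getLastD l)

lemma pvExpected_succ (sw k : Int) (hk : 0 ≤ k) :
    (if pvExpected sw (if sw ≠ 0 then 0 else 1) k = 0 then (1 : Int) else 0)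
      = pvExpected sw (if sw ≠ 0 then 0 else 1) (k + 1) := by
  simp only [pvExpected,
    PySem.Int.mod_eq_emod_of_pos (show (0:Int) < 2 by omega)]
  split_ifs <;> omega

lemma pvSpecB_nil (sw base vtf l : Int) : pvSpecB sw base vtf l [] = some l := by
  simp [pvSpecB, pvLoopB]

lemma pvSpecB_cons (sw base vtf l i : Int) (t : List Int) :
    pvSpecB sw base vtf l (i :: t)
      = if vtf ≠ pvExpected sw base i then some i else pvSpecB sw base vtf i t := by
  by_cases h : vtf ≠ pvExpected sw base i
  · simp [pvSpecB, pvLoopB, h]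
  · simp only [pvSpecB, pvLoopB, if_neg h]
    cases pvLoopB sw base vtf t with
    | some j => rfl
    | none =>
        show some ((i :: t).getLastD l) = some (t.getLastD i)
        rw [List.getLastD_cons]

lemma pvLoop_eq (vtf sw base : Int) (hb : base = if sw ≠ 0 then 0 else 1) :
    ∀ (cf : List Int) (k l : Int), 0 ≤ k →
      pvLoopA vtf cf k l (pvExpected sw base k)
        = pvSpecB sw base vtf l (pvPosFrom vtf k cf) := by
  intro cf
  induction cf with
  | nil =>
      intro k l hk
      simp [pvLoopA, pvPosFrom, PySem.List.enumerate_nil, pvSpecB_nil]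
  | cons v rest ih =>
      intro k l hk
      rw [pvPosFrom, PySem.List.enumerate_cons]
      by_cases hv : v = vtf
      · subst hv
        rw [List.filter_cons, if_pos (by simp), List.map_cons,
          show ((PySem.List.enumerate rest (k+1)).filter
              (fun p => p.2 = v)).map Prod.fst = pvPosFrom v (k+1) rest from rfl,
          pvSpecB_cons]
        by_cases hbad : v ≠ pvExpected sw base k
        · rw [pvLoopA, if_pos ⟨hbad, rfl⟩, if_pos hbad]
        · rw [not_not] at hbad
          rw [pvLoopA, if_neg (by simp [hbad]), if_pos rfl, hb,
            pvExpected_succ sw k hk, ← hb, ih (k + 1) k (by omega),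
            if_neg (by simp [hbad])]
      · rw [List.filter_cons, if_neg (by simp [hv])]
        rw [show ((PySem.List.enumerate rest (k+1)).filter
              (fun p => p.2 = vtf)).map Prod.fst = pvPosFrom vtf (k+1) rest from rfl]
        rw [pvLoopA, if_neg (by simp [hv]), if_neg hv, hb,
          pvExpected_succ sw k hk, ← hb, ih (k + 1) l (by omega)]

lemma pvPos_nil_iff (vtf : Int) :
    ∀ (cf : List Int) (k : Int), pvPosFrom vtf k cf = [] ↔ PySem.List.count cf vtf = 0 := by
  intro cf
  induction cf with
  | nil => intro k; simp [pvPosFrom, PySem.List.enumerate_nil, PySem.List.count]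
  | cons v rest ih =>
      intro k
      rw [pvPosFrom, PySem.List.enumerate_cons]
      by_cases hv : v = vtf
      · subst hv
        simp [PySem.List.count_eq]
      · rw [List.filter_cons, if_neg (by simp [hv])]
        rw [show ((PySem.List.enumerate rest (k+1)).filter
              (fun p => p.2 = vtf)).map Prod.fst
            = pvPosFrom vtf (k+1) rest from rfl, ih (k+1)]
        simp [PySem.List.count_eq, hv]

-- ===== VERDICT (by name: the statement is the Claim_ definition above) =====
theorem get_first_invalid_position_spec : Claim_equal_get_first_invalid_position := by
  intro cf sw vtf _
  unfold Spec_get_first_invalid_position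
  unfold get_first_invalid_position get_first_invalid_position_alt
  by_cases hc : PySem.List.count cf vtf = 0
  · rw [if_pos hc]
    rw [show ((PySem.List.enumerate cf).filter (fun p => p.2 = vtf)).map Prod.fst
        = pvPosFrom vtf 0 cf from rfl]
    rw [if_pos ((pvPos_nil_iff vtf cf 0).mpr hc)]
  · rw [if_neg hc]
    rw [show ((PySem.List.enumerate cf).filter (fun p => p.2 = vtf)).map Prod.fst
        = pvPosFrom vtf 0 cf from rfl]
    have hne : pvPosFrom vtf 0 cf ≠ [] := fun h => hc ((pvPos_nil_iff vtf cf 0).mp h)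
    rw [if_neg hne]
    have h0 : pvExpected sw (if sw ≠ 0 then 0 else 1) 0 = sw := by simp [pvExpected]
    have heq := pvLoop_eq vtf sw (if sw ≠ 0 then 0 else 1) rfl cf 0 0 (by omega)
    rw [h0] at heq
    rw [heq, pvSpecB]
    show (match pvLoopB sw (if sw ≠ 0 then 0 else 1) vtf (pvPosFrom vtf 0 cf) with
          | some i => some i
          | none => some ((pvPosFrom vtf 0 cf).getLastD 0))
        = (match pvLoopB sw (if sw ≠ 0 then 0 else 1) vtf (pvPosFrom vtf 0 cf) with
          | some i => some i
          | none => PySem.List.pyGet? (pvPosFrom vtf 0 cf) (-1))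
    cases hB : pvLoopB sw (if sw ≠ 0 then 0 else 1) vtf (pvPosFrom vtf 0 cf) with
    | some i => rfl
    | none =>
        rw [PySem.List.pyGet?_neg_one]
        rcases hg : (pvPosFrom vtf 0 cf).getLast? with _ | x
        · exact absurd (List.getLast?_eq_none_iff.mp hg) hne
        · rw [List.getLastD_eq_getLast?, hg]; rfl
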